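-- pv_equiv track=rewrite | github.com/bob-ros2/bob_central | skills/self_evolution/scripts/self_evolution_fixed.py | _fallback_mutation
-- ===== SOURCE A (Python) =====
-- def _fallback_mutation(prompt, current_code, context):
--     """Fallback mutation logic when LLM is not available."""
--     prompt_lower = prompt.lower()
--
--     # Simple rule-based mutations
--     lines = current_code.split('\n')
--     modified_lines = []
--
--     for i, line in enumerate(lines):
--         # Check if this is the calculate_sum function
--         if 'def calculate_sum' in line and 'performance' in prompt_lower:
--             # Replace with optimized version
--             modified_lines.append('def calculate_sum(numbers):')
--             modified_lines.append('    """Calculate sum using sum()."""')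
--             modified_lines.append('    return sum(numbers)')
--             # Skip the original implementation
--             j = i + 1
--             while j < len(lines) and (lines[j].startswith(' ') or lines[j] == ''):
--                 j += 1
--             return '\n'.join(modified_lines + lines[j:])
--         else:
--             modified_lines.append(line)
--
--     result = '\n'.join(modified_lines)
--
--     # Add optimization comment if performance mentioned
--     if 'performance' in prompt_lower or 'optimize' in prompt_lower:
--         result += '\n\n# Performance optimization applied based on mutation prompt'
--
--     return result
-- ===== SOURCE B (Python) =====
-- def _fallback_mutation(prompt, current_code, context):
--     """Fallback mutation via block decomposition: group the code into
--     indentation blocks, replace at block level, then flatten."""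
--     prompt_lower = prompt.lower()
--     lines = current_code.split('\n')
--
--     def is_body(l):
--         return l.startswith(' ') or l == ''
--
--     # Parse into blocks: each block is one line plus its indented/blank continuation.
--     blocks = []
--     n = len(lines)
--     i = 0
--     while i < n:
--         j = i + 1
--         while j < n and is_body(lines[j]):
--             j += 1
--         blocks.append(lines[i:j])
--         i = j
--
--     if 'performance' in prompt_lower:
--         repl = ['def calculate_sum(numbers):',
--                 '    """Calculate sum using sum()."""',
--                 '    return sum(numbers)']
--         for bi, block in enumerate(blocks):
--             for li, line in enumerate(block):
--                 if 'def calculate_sum' in line: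
--                     new_blocks = blocks[:bi] + [block[:li] + repl] + blocks[bi + 1:]
--                     return '\n'.join(l for b in new_blocks for l in b)
--
--     result = '\n'.join(lines)
--     if 'performance' in prompt_lower or 'optimize' in prompt_lower:
--         result += '\n\n# Performance optimization applied based on mutation prompt'
--     return result
-- ===== Notes on version B (the rewrite author's own statement) =====
-- stated objective: alternative
-- what changed: Replaces A's flat scan that accumulates modified_lines and early-returns mid-loop by a block decomposition: the code is first parsed into indentation blocks (a line plus its indented/blank continuation), the first block line containing 'def calculate_sum' is replaced at block level (block[:li] + replacement), and the block list is flattened and joined; the no-match comment logic is unchanged.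
import Mathlib
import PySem

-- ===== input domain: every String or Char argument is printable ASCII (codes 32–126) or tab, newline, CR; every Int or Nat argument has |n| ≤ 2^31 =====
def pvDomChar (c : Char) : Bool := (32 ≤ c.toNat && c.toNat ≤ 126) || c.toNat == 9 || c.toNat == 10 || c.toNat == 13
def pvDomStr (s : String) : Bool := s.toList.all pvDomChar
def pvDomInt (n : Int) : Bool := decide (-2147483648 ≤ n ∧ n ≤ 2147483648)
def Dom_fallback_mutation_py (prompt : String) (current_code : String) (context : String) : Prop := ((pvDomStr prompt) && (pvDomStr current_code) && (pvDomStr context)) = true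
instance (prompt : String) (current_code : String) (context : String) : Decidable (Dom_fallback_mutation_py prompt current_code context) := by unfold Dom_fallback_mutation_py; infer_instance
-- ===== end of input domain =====

-- B replaces A's flat scan-with-mid-loop-return by a block decomposition: the code is
-- parsed into indentation blocks (header line + indented/blank continuation), the first
-- block line containing the marker is replaced at block level, and the blocks are
-- flattened back; objective: alternative, same cost.


-- ===== PORT A =====
-- the marker test 'def calculate_sum' in line (shared by both ports)
def pvMark (l : String) : Bool := PySem.Str.isIn "def calculate_sum" l

-- the three replacement lines appended by both programs
def pvRepl : List String :=
  ["def calculate_sum(numbers):", "    \"\"\"Calculate sum using sum().\"\"\"", "    return sum(numbers)"]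

-- A's inner while loop: skip indented or blank lines (advances j over lines[i+1:])
def pvASkip : List String → List String
  | [] => []
  | l :: rest => if PySem.Str.startswith l " " || l == "" then pvASkip rest else l :: rest

-- A's for loop: accumulate into modified_lines, early return on the matching line
def pvALoop (perf : Bool) (acc : List String) : List String → List String × Bool
  | [] => (acc, false)
  | l :: rest =>
    if pvMark l && perf then
      (acc ++ pvRepl ++ pvASkip rest, true)
    else pvALoop perf (acc ++ [l]) rest

def fallback_mutation_py (prompt : String) (current_code : String) (context : String) : String :=
  let prompt_lower := PySem.Str.lower prompt
  -- current_code.split('\n'): sep is nonempty so split? is always some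
  let lines := (PySem.Str.split? current_code "\n").getD []
  let perf := PySem.Str.isIn "performance" prompt_lower
  let r := pvALoop perf [] lines
  if r.2 then PySem.Str.join "\n" r.1
  else
    let result := PySem.Str.join "\n" r.1
    if perf || PySem.Str.isIn "optimize" prompt_lower then
      result ++ "\n\n# Performance optimization applied based on mutation prompt"
    else result

-- ===== PORT B =====
-- is_body l = l.startswith(' ') or l == ''
def pvIsBody (l : String) : Bool := PySem.Str.startswith l " " || l == ""

-- B's block parser: lines[i:j] = head line plus its indented/blank continuation lines
def pvChunks : List String → List (List String)
  | [] => []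
  | l :: rest => (l :: rest.takeWhile pvIsBody) :: pvChunks (rest.dropWhile pvIsBody)
  termination_by ls => ls.length
  decreasing_by simpa using Nat.lt_succ_of_le (List.length_dropWhile_le _ _)

-- B's nested search loop: first block containing the marker is rewritten in place
def pvReplaceFirst : List (List String) → Option (List (List String))
  | [] => none
  | b :: rest =>
    match b.findIdx? (fun l => pvMark l) with
    | some li => some ((b.take li ++ pvRepl) :: rest)
    | none => (pvReplaceFirst rest).map (b :: ·)

def fallback_mutation_py_alt (prompt : String) (current_code : String) (context : String) : String :=
  let prompt_lower := PySem.Str.lower prompt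
  let lines := (PySem.Str.split? current_code "\n").getD []
  let blocks := pvChunks lines
  let hit := if PySem.Str.isIn "performance" prompt_lower then pvReplaceFirst blocks else none
  match hit with
  | some nb => PySem.Str.join "\n" nb.flatten
  | none =>
    let result := PySem.Str.join "\n" lines
    if PySem.Str.isIn "performance" prompt_lower || PySem.Str.isIn "optimize" prompt_lower then
      result ++ "\n\n# Performance optimization applied based on mutation prompt"
    else result

-- ===== PRECONDITION & SPEC =====
def Spec_fallback_mutation_py (prompt : String) (current_code : String) (context : String) (out : String) : Prop := out = fallback_mutation_py_alt prompt current_code context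
instance (prompt : String) (current_code : String) (context : String) (out : String) : Decidable (Spec_fallback_mutation_py prompt current_code context out) := by unfold Spec_fallback_mutation_py; infer_instance

-- ===== CLAIM (what is proved, stated in full; the proofs are below) =====
def Claim_equal_fallback_mutation_py : Prop := ∀ (prompt : String) (current_code : String) (context : String), Dom_fallback_mutation_py prompt current_code context → Spec_fallback_mutation_py prompt current_code context (fallback_mutation_py prompt current_code context)

-- ===== LEMMAS AND PROOFS =====
lemma pvChunks_flatten (ls : List String) : (pvChunks ls).flatten = ls := by
  induction ls using pvChunks.induct with
  | case1 => simp [pvChunks]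
  | case2 l rest ih =>
    simp [pvChunks, ih, List.takeWhile_append_dropWhile]

lemma pvASkip_eq_dropWhile (ls : List String) :
    pvASkip ls = ls.dropWhile pvIsBody := by
  induction ls with
  | nil => rfl
  | cons l rest ih =>
    simp only [pvASkip, List.dropWhile_cons, pvIsBody]
    split_ifs <;> simp_all

-- scanning A's loop through a block body (all lines indented/blank), r already skip-free
lemma pvBodyScan (t r acc : List String) (hb : ∀ x ∈ t, pvIsBody x = true)
    (hr : r.dropWhile pvIsBody = r) :
    pvALoop true acc (t ++ r) =
      match t.findIdx? (fun l => pvMark l) with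
      | some li => (acc ++ t.take li ++ pvRepl ++ r, true)
      | none => pvALoop true (acc ++ t) r := by
  induction t generalizing acc with
  | nil => simp
  | cons x t ih =>
    by_cases hx : pvMark x = true
    · simp only [List.cons_append, pvALoop, hx, Bool.and_self, if_true,
        List.findIdx?_cons, List.take_zero, List.append_nil,
        pvASkip_eq_dropWhile, List.dropWhile_append]
      have ht : t.dropWhile pvIsBody = [] :=
        List.dropWhile_eq_nil_iff.mpr (fun y hy => by simpa using hb y (by simp [hy]))
      simp [ht, hr]
    · have hb' : ∀ y ∈ t, pvIsBody y = true := fun y hy => hb y (by simp [hy])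
      simp only [List.cons_append, pvALoop, hx, Bool.false_and, Bool.false_eq_true,
        if_false, ih _ hb', List.findIdx?_cons]
      cases hf : t.findIdx? (fun l => pvMark l) <;>
        simp [List.take_succ_cons]

-- A's loop, characterised against B's block structure
lemma pvALoop_true_chunks (ls : List String) (acc : List String) :
    pvALoop true acc ls =
      match pvReplaceFirst (pvChunks ls) with
      | some nb => (acc ++ nb.flatten, true)
      | none => (acc ++ ls, false) := by
  induction ls using pvChunks.induct generalizing acc with
  | case1 => simp [pvALoop, pvChunks, pvReplaceFirst]
  | case2 l rest ih =>
    have hb : ∀ x ∈ rest.takeWhile pvIsBody, pvIsBody x = true :=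
      fun x hx => List.mem_takeWhile_imp hx
    have hr : (rest.dropWhile pvIsBody).dropWhile pvIsBody = rest.dropWhile pvIsBody :=
      List.dropWhile_idempotent pvIsBody rest
    by_cases hl : pvMark l = true
    · simp only [pvALoop, hl, Bool.and_self, if_true, pvChunks, pvReplaceFirst,
        List.findIdx?_cons, List.take_zero, List.nil_append,
        List.flatten_cons, pvChunks_flatten, pvASkip_eq_dropWhile]
      simp
    · have step : pvALoop true acc (l :: rest) = pvALoop true (acc ++ [l]) rest := by
        simp only [pvALoop, Bool.and_true]; rw [if_neg hl]
      rw [step, ← List.takeWhile_append_dropWhile (p := pvIsBody) (l := rest),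
        pvBodyScan _ _ _ hb hr]
      simp only [pvChunks, pvReplaceFirst, List.findIdx?_cons, hl]
      cases hf : (rest.takeWhile pvIsBody).findIdx?
          (fun l => pvMark l) with
      | some li =>
          simp [hf, List.take_succ_cons, pvChunks_flatten]
      | none =>
          rw [ih]
          cases hg : pvReplaceFirst (pvChunks (rest.dropWhile pvIsBody)) <;>
            simp [hf, hg, List.takeWhile_append_dropWhile]

lemma pvALoop_false (ls acc : List String) :
    pvALoop false acc ls = (acc ++ ls, false) := by
  induction ls generalizing acc with
  | nil => simp [pvALoop]
  | cons l rest ih => simp [pvALoop, ih]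

-- ===== VERDICT (by name: the statement is the Claim_ definition above) =====
theorem fallback_mutation_py_spec : Claim_equal_fallback_mutation_py := by
  intro prompt current_code context _
  unfold Spec_fallback_mutation_py fallback_mutation_py fallback_mutation_py_alt
  by_cases hp : PySem.Str.isIn "performance" (PySem.Str.lower prompt) = true
  · simp only [hp, if_true, pvALoop_true_chunks]
    cases hf : pvReplaceFirst (pvChunks ((PySem.Str.split? current_code "\n").getD [])) <;>
      simp
  · rw [Bool.not_eq_true] at hp
    simp only [hp, pvALoop_false, Bool.false_eq_true, if_false, Bool.false_or, List.nil_append]
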